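-- pv_equiv track=rewrite | github.com/ripeart/Shared-Drive-Audit | audit_shared_drives.py | analyze_permissions
-- ===== SOURCE A (Python) =====
-- def analyze_permissions(perms):
--     role_map = {
--         'organizer': [],
--         'fileOrganizer': [],
--         'writer': [],
--         'commenter': [],
--         'reader': []
--     }
--     uses_groups = False
--     external_access = False
--
--     for perm in perms:
--         role = perm.get('role')
--         if role not in role_map:
--             continue
--
--         identity = perm.get('emailAddress') or perm.get('domain') or perm.get('id')
--         role_map[role].append(identity)
--
--         if perm.get('type') == 'group':
--             uses_groups = True
--         if perm.get('type') == 'anyone' or (perm.get('emailAddress') and not perm['emailAddress'].endswith('@yourdomain.com')):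
--             external_access = True
--
--     return role_map, uses_groups, external_access
-- ===== SOURCE B (Python) =====
-- def analyze_permissions(perms):
--     roles = ('organizer', 'fileOrganizer', 'writer', 'commenter', 'reader')
--     role_map = {r: [] for r in roles}
--     valid = [p for p in perms if p.get('role') in role_map]
--     for p in valid:
--         role_map[p['role']].append(p.get('emailAddress') or p.get('domain') or p.get('id'))
--     uses_groups = any(p.get('type') == 'group' for p in valid)
--     external_access = any(
--         p.get('type') == 'anyone'
--         or (p.get('emailAddress') and not p['emailAddress'].endswith('@yourdomain.com'))
--         for p in valid
--     )
--     return role_map, uses_groups, external_access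
-- ===== Notes on version B (the rewrite author's own statement) =====
-- stated objective: simpler
-- what changed: Replaces A's single fused loop with three differently-shaped passes: a filter comprehension selecting valid-role perms, one grouping pass populating the pre-seeded role map, and two any() scans computing the flags separately.
import Mathlib
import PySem

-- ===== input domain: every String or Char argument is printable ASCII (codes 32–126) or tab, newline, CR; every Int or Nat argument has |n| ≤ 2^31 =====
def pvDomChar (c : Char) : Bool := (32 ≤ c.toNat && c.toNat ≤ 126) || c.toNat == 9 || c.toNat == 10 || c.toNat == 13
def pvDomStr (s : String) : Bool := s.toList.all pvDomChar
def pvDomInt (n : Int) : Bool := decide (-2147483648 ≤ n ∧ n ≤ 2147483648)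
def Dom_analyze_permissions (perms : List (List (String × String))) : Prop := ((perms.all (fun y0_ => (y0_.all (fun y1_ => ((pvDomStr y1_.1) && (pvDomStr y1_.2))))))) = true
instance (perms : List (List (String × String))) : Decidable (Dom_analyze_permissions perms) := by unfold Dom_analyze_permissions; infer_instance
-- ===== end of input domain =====

-- B replaces A's single fused loop by three separate passes (filter valid perms, one grouping pass, two any-scans); objective: simpler decomposition, same O(n) cost.


-- shared primitive helpers (dict.get on an association list, Python truthiness of `x or y` on str values)
def pvGet (perm : List (String × String)) (k : String) : Option String :=
  (perm.find? (fun kv => kv.1 == k)).map (·.2)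

-- Python `a or b` where a : Optional[str] (falsy = missing or empty string)
def pyOrStr (a b : Option String) : Option String :=
  match a with
  | some s => if s == "" then b else some s
  | none => b

-- perm.get('emailAddress') or perm.get('domain') or perm.get('id');
-- the `.getD ""` arm is unreachable under Pre_ (Python would put a non-str None there)
def pvIdentity (perm : List (String × String)) : String :=
  (pyOrStr (pvGet perm "emailAddress") (pyOrStr (pvGet perm "domain") (pvGet perm "id"))).getD ""

-- perm.get('type') == 'group'
def pvGroupCond (perm : List (String × String)) : Bool :=
  pvGet perm "type" == some "group"

-- perm.get('type') == 'anyone' or (perm.get('emailAddress') and not perm['emailAddress'].endswith('@yourdomain.com'))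
def pvExtCond (perm : List (String × String)) : Bool :=
  pvGet perm "type" == some "anyone" ||
    (match pvGet perm "emailAddress" with
     | some e => !(e == "") && !(PySem.Str.endswith e "@yourdomain.com")
     | none => false)

def pvInitMap : PySem.Dict String (List String) :=
  PySem.Dict.ofList [("organizer", []), ("fileOrganizer", []), ("writer", []), ("commenter", []), ("reader", [])]

-- ===== PORT A =====
-- loop body of A: one fused pass mutating (role_map, uses_groups, external_access)
def pvStepA (st : PySem.Dict String (List String) × Bool × Bool) (perm : List (String × String)) :
    PySem.Dict String (List String) × Bool × Bool :=
  match pvGet perm "role" with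
  | none => st
  | some role =>
    if st.1.contains role then
      (st.1.modify role [] (fun l => l ++ [pvIdentity perm]),
       (if pvGroupCond perm then true else st.2.1),
       (if pvExtCond perm then true else st.2.2))
    else st

def analyze_permissions (perms : List (List (String × String))) : (List (String × List String)) × Bool × Bool :=
  let res := perms.foldl pvStepA (pvInitMap, false, false)
  (res.1.items, res.2.1, res.2.2)

-- ===== PORT B =====
-- p.get('role') in role_map (role_map freshly seeded with the five roles)
def pvValid (perm : List (String × String)) : Bool :=
  match pvGet perm "role" with
  | some r => pvInitMap.contains r
  | none => false

def analyze_permissions_alt (perms : List (List (String × String))) : (List (String × List String)) × Bool × Bool :=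
  let valid := perms.filter pvValid
  let rm := valid.foldl (fun d perm => d.modify ((pvGet perm "role").getD "") [] (fun l => l ++ [pvIdentity perm])) pvInitMap
  (rm.items, valid.any pvGroupCond, valid.any pvExtCond)

-- ===== PRECONDITION & SPEC =====
-- Pre_ excludes inputs where some valid-role perm has no truthy emailAddress/domain and no 'id' key:
-- there Python appends None — not a value of the declared str type (both Pythons return that same dict).
def Pre_analyze_permissions (perms : List (List (String × String))) : Prop :=
  (perms.all (fun p =>
    !(pvValid p) || (pyOrStr (pvGet p "emailAddress") (pyOrStr (pvGet p "domain") (pvGet p "id"))).isSome)) = true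

instance (perms : List (List (String × String))) : Decidable (Pre_analyze_permissions perms) := by
  unfold Pre_analyze_permissions; infer_instance

def pvWitness_analyze_permissions : (List (List (String × String))) :=
  [[("role", "reader"), ("id", "x")], [("role", "writer"), ("emailAddress", "a@b.com"), ("type", "group")]]

def Spec_analyze_permissions (perms : List (List (String × String))) (out : (List (String × List String)) × Bool × Bool) : Prop := out = analyze_permissions_alt perms
instance (perms : List (List (String × String))) (out : (List (String × List String)) × Bool × Bool) : Decidable (Spec_analyze_permissions perms out) := by unfold Spec_analyze_permissions; infer_instance

-- ===== CLAIM (what is proved, stated in full; the proofs are below) =====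
def Claim_equal_analyze_permissions : Prop := ∀ (perms : List (List (String × String))), Dom_analyze_permissions perms → Pre_analyze_permissions perms → Spec_analyze_permissions perms (analyze_permissions perms)

-- ===== LEMMAS AND PROOFS =====

-- A's fused loop, from any state whose key set matches the seeded map, equals B's three passes
theorem pv_loop_eq (l : List (List (String × String))) (d : PySem.Dict String (List String)) (u e : Bool)
    (hd : ∀ r, d.contains r = pvInitMap.contains r) :
    l.foldl pvStepA (d, u, e) =
      ((l.filter pvValid).foldl (fun d perm => d.modify ((pvGet perm "role").getD "") [] (fun l => l ++ [pvIdentity perm])) d,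
       u || (l.filter pvValid).any pvGroupCond,
       e || (l.filter pvValid).any pvExtCond) := by
  induction l generalizing d u e with
  | nil => simp
  | cons p l ih =>
    by_cases hv : pvValid p = true
    · obtain ⟨r, hr, hc0⟩ : ∃ r, pvGet p "role" = some r ∧ pvInitMap.contains r = true := by
        unfold pvValid at hv
        cases h : pvGet p "role" with
        | none => rw [h] at hv; exact absurd hv (by simp)
        | some r => rw [h] at hv; exact ⟨r, rfl, hv⟩
      have hc : d.contains r = true := by rw [hd]; exact hc0
      have hstep : pvStepA (d, u, e) p =
          (d.modify r [] (fun l => l ++ [pvIdentity p]),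
           (if pvGroupCond p then true else u),
           (if pvExtCond p then true else e)) := by
        simp [pvStepA, hr, hc]
      have hd' : ∀ r', (d.modify r [] (fun l => l ++ [pvIdentity p])).contains r' = pvInitMap.contains r' := by
        intro r'
        rw [PySem.Dict.contains_modify]
        by_cases h : r' = r
        · subst h; simp [hc0]
        · simp [h, hd]
      rw [List.foldl_cons, hstep, ih _ _ _ hd']
      simp only [List.filter_cons, hv, if_true, List.foldl_cons, List.any_cons, hr,
        Option.getD_some, Prod.mk.injEq]
      refine ⟨trivial, ?_, ?_⟩ <;> cases pvGroupCond p <;> cases pvExtCond p <;> cases u <;> cases e <;> simp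
    · have hstep : pvStepA (d, u, e) p = (d, u, e) := by
        unfold pvValid at hv
        cases h : pvGet p "role" with
        | none => simp [pvStepA, h]
        | some r =>
          rw [h] at hv
          have : d.contains r = false := by rw [hd]; simpa using hv
          simp [pvStepA, h, this]
      rw [List.foldl_cons, hstep, ih _ _ _ hd]
      simp [hv]

-- ===== VERDICT (by name: the statement is the Claim_ definition above) =====
theorem analyze_permissions_spec : Claim_equal_analyze_permissions := by
  intro perms _ _
  unfold Spec_analyze_permissions
  simp only [analyze_permissions, analyze_permissions_alt]
  rw [pv_loop_eq perms pvInitMap false false (fun _ => rfl)]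
  simp
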